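-- pv_equiv track=rewrite | github.com/tejas16FF/fitbot | app.py | simple_local_retriever
-- ===== SOURCE A (Python) =====
-- def simple_local_retriever(query: str, kb_text: str, top_n: int = 3) -> str:
--     q = [w for w in query.lower().split() if w.strip()]
--     paras = [p.strip() for p in kb_text.split("\n\n") if p.strip()]
--     scored = []
--     for p in paras:
--         score = sum(1 for w in q if w in p.lower())
--         scored.append((score, p))
--     scored.sort(reverse=True, key=lambda x: x[0])
--     selected = [p for s, p in scored if s > 0][:top_n]
--     if not selected:
--         return "General fitness guidance: progressive overload, protein, hydration, rest."
--     return "\n\n---\n\n".join(selected)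
-- ===== SOURCE B (Python) =====
-- def simple_local_retriever(query: str, kb_text: str, top_n: int = 3) -> str:
--     q = query.lower().split()  # split() never yields empty or whitespace-only tokens
--     # fuse strip/filter/score into one pass; no sort: scores are bounded by len(q)
--     scored = []
--     for chunk in kb_text.split("\n\n"):
--         p = chunk.strip()
--         if not p:
--             continue
--         pl = p.lower()
--         scored.append((sum(w in pl for w in q), p))
--     # select by sweeping the possible scores from high to low (stable, no comparison sort)
--     selected = []
--     for s in range(len(q), 0, -1):
--         for sc, p in scored:
--             if sc == s:
--                 selected.append(p)
--     selected = selected[:top_n]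
--     if not selected:
--         return "General fitness guidance: progressive overload, protein, hydration, rest."
--     return "\n\n---\n\n".join(selected)
-- ===== Notes on version B (the rewrite author's own statement) =====
-- stated objective: alternative
-- what changed: Drops the comparison sort entirely: one fused pass strips/filters/scores the paragraphs (summing booleans, lowercasing each paragraph once), then selection sweeps the bounded score range len(q)..1 and collects the paragraphs of each score in appearance order, which reproduces the stable reverse sort without sorting.
import Mathlib
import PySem

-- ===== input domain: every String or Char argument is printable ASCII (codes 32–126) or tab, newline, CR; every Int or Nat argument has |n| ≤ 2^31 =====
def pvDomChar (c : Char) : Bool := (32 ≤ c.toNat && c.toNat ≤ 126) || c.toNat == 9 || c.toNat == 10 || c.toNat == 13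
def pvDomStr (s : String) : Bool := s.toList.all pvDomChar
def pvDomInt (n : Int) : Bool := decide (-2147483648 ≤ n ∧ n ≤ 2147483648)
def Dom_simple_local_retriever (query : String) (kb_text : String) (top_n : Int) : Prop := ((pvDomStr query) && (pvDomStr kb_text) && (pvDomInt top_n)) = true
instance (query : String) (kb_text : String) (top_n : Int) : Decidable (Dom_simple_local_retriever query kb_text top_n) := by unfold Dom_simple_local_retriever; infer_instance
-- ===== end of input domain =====

-- B replaces A's sort of (score, paragraph) pairs by a sort-free selection: one fused pass
-- scores the stripped paragraphs, then a sweep over the bounded score range len(q)..1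
-- collects each score class in appearance order (= the stable reverse sort).

-- ===== PORT A =====
def simple_local_retriever (query : String) (kb_text : String) (top_n : Int) : String :=
  let q := (PySem.Str.split₀ (PySem.Str.lower query)).filter (fun w => !(PySem.Str.strip w == ""))
  let paras := (((PySem.Str.split? kb_text "\n\n").getD []).map PySem.Str.strip).filter (fun p => !(p == ""))
  let scored := paras.map (fun p =>
    (q.foldl (fun acc w => if PySem.Str.isIn w (PySem.Str.lower p) then acc + 1 else acc) (0 : Int), p))
  let scored := PySem.List.sorted scored (fun x => x.1) true
  let selected := PySem.List.slice ((scored.filter (fun x => decide (0 < x.1))).map (fun x => x.2)) none (some top_n)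
  if selected.isEmpty then "General fitness guidance: progressive overload, protein, hydration, rest."
  else PySem.Str.join "\n\n---\n\n" selected

-- ===== PORT B =====
def simple_local_retriever_alt (query : String) (kb_text : String) (top_n : Int) : String :=
  -- split() never yields empty or whitespace-only tokens, so A's filter on q is the identity
  let q := PySem.Str.split₀ (PySem.Str.lower query)
  -- one fused pass: strip each chunk, skip the empty ones, score by a boolean sum
  let scored := ((PySem.Str.split? kb_text "\n\n").getD []).foldl (fun acc chunk =>
    let p := PySem.Str.strip chunk
    if p == "" then acc
    else
      let pl := PySem.Str.lower p
      acc ++ [((q.map (fun w => if PySem.Str.isIn w pl then (1 : Int) else 0)).sum, p)]) []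
  -- sweep the possible scores high→low, collecting each class in appearance order
  let selected := (PySem.List.pyRange (q.length : Int) 0 (-1)).foldl (fun sel s =>
    scored.foldl (fun sel x => if x.1 == s then sel ++ [x.2] else sel) sel) []
  let selected := PySem.List.slice selected none (some top_n)
  if selected.isEmpty then "General fitness guidance: progressive overload, protein, hydration, rest."
  else PySem.Str.join "\n\n---\n\n" selected

-- ===== PRECONDITION & SPEC =====
def Spec_simple_local_retriever (query : String) (kb_text : String) (top_n : Int) (out : String) : Prop := out = simple_local_retriever_alt query kb_text top_n
instance (query : String) (kb_text : String) (top_n : Int) (out : String) : Decidable (Spec_simple_local_retriever query kb_text top_n out) := by unfold Spec_simple_local_retriever; infer_instance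

-- ===== CLAIM (what is proved, stated in full; the proofs are below) =====
def Claim_equal_simple_local_retriever : Prop := ∀ (query : String) (kb_text : String) (top_n : Int), Dom_simple_local_retriever query kb_text top_n → Spec_simple_local_retriever query kb_text top_n (simple_local_retriever query kb_text top_n)

-- ===== LEMMAS AND PROOFS =====

-- tokens of str.split() are nonempty and contain no whitespace
theorem pv_split₀_go_tokens (s cur : List Char) (acc : List (List Char))
    (hacc : ∀ t ∈ acc, t ≠ [] ∧ ∀ c ∈ t, PySem.Chars.isspace c = false)
    (hcur : ∀ c ∈ cur, PySem.Chars.isspace c = false) :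
    ∀ t ∈ PySem.Chars.split₀.go s cur acc, t ≠ [] ∧ ∀ c ∈ t, PySem.Chars.isspace c = false := by
  induction s generalizing cur acc with
  | nil =>
    intro t ht
    by_cases hc : cur.isEmpty
    · simp [PySem.Chars.split₀.go, hc] at ht
      exact hacc t ht
    · simp [PySem.Chars.split₀.go, hc] at ht
      rcases ht with h | h
      · exact hacc t h
      · subst h
        constructor
        · simpa using (by simpa using hc : cur ≠ [])
        · intro c hc'
          exact hcur c (by simpa using hc')
  | cons c rest ih =>
    intro t ht
    by_cases hs : PySem.Chars.isspace c
    · by_cases hc : cur.isEmpty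
      · simp only [PySem.Chars.split₀.go, hs, hc, if_true] at ht
        exact ih [] acc hacc (by simp) t ht
      · simp only [PySem.Chars.split₀.go, hs, hc, if_true, Bool.false_eq_true, if_false] at ht
        refine ih [] (cur.reverse :: acc) ?_ (by simp) t ht
        intro u hu
        rcases List.mem_cons.mp hu with h | h
        · subst h
          exact ⟨by simpa using (by simpa using hc : cur ≠ []), fun d hd => hcur d (by simpa using hd)⟩
        · exact hacc u h
    · simp only [PySem.Chars.split₀.go, hs, Bool.false_eq_true, if_false] at ht
      refine ih (c :: cur) acc hacc ?_ t ht
      intro d hd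
      rcases List.mem_cons.mp hd with h | h
      · subst h; simpa using hs
      · exact hcur d h

theorem pv_strip_of_no_space (t : List Char) (h : ∀ c ∈ t, PySem.Chars.isspace c = false) :
    PySem.Chars.strip t = t := by
  have hall : ∀ (u : List Char), (∀ c ∈ u, PySem.Chars.isspace c = false) →
      List.dropWhile PySem.Chars.isspace u = u := by
    intro u hu
    cases u with
    | nil => rfl
    | cons c cs => simp [List.dropWhile, hu c (by simp)]
  have h1 : PySem.Chars.lstrip t = t := hall t h
  have h2 : PySem.Chars.rstrip t = t := by
    simp only [PySem.Chars.rstrip]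
    rw [hall t.reverse (fun c hc => h c (by simpa using hc))]
    simp
  simp [PySem.Chars.strip, h1, h2]

-- A's redundant filter on query.split() is the identity
theorem pv_q_filter_id (s : String) :
    (PySem.Str.split₀ s).filter (fun w => !(PySem.Str.strip w == "")) = PySem.Str.split₀ s := by
  apply List.filter_eq_self.mpr
  intro w hw
  simp only [PySem.Str.split₀] at hw
  obtain ⟨cs, hcs, rfl⟩ := List.mem_map.mp hw
  have h := pv_split₀_go_tokens s.toList [] [] (by simp) (by simp) cs hcs
  have hstrip : PySem.Chars.strip cs = cs := pv_strip_of_no_space cs h.2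
  simp only [Bool.not_eq_eq_eq_not, Bool.not_true, beq_eq_false_iff_ne, ne_eq]
  intro heq
  apply h.1
  have := congrArg String.toList heq
  simpa [hstrip] using this

-- insertBy unfolding on a cons
theorem pv_insertBy_cons {α : Type} (bef : α → α → Bool) (x y : α) (ys : List α) :
    PySem.List.insertBy bef x (y :: ys) = if bef x y then x :: y :: ys else y :: PySem.List.insertBy bef x ys := by
  simp [PySem.List.insertBy]

-- insertBy passes through a block it never inserts into
theorem pv_insertBy_append {α : Type} (bef : α → α → Bool) (x : α) (l r : List α)
    (h : ∀ y ∈ l, bef x y = false) :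
    PySem.List.insertBy bef x (l ++ r) = l ++ PySem.List.insertBy bef x r := by
  induction l with
  | nil => simp
  | cons a l ih =>
    have ha := h a (by simp)
    simp only [List.cons_append, pv_insertBy_cons, ha, Bool.false_eq_true, if_false]
    simp [ih (fun y hy => h y (by simp [hy]))]

-- insertBy inserts at the head when it goes before everything
theorem pv_insertBy_front {α : Type} (bef : α → α → Bool) (x : α) (r : List α)
    (h : ∀ y ∈ r, bef x y = true) :
    PySem.List.insertBy bef x r = x :: r := by
  cases r with
  | nil => simp [PySem.List.insertBy]
  | cons y ys => simp [pv_insertBy_cons, h y (by simp)]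

-- inserting into a bucket decomposition: x lands at the end of its own bucket
theorem pv_insertBy_flatMap {α : Type} (f : α → Int) (x : α) (K : List Int) (g : Int → List α)
    (hK : K.Pairwise (· > ·)) (hx : f x ∈ K) (hg : ∀ k ∈ K, ∀ y ∈ g k, f y = k) :
    PySem.List.insertBy (fun a b => decide (f b < f a)) x (K.flatMap g)
      = K.flatMap (fun k => g k ++ if f x = k then [x] else []) := by
  induction K with
  | nil => simp at hx
  | cons k K ih =>
    have hKp : ∀ k' ∈ K, k > k' := (List.pairwise_cons.mp hK).1
    by_cases hfx : f x = k
    · have hnotK : ∀ k' ∈ K, f x ≠ k' := fun k' hk' => by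
        have := hKp k' hk'; omega
      have hl : ∀ y ∈ g k, (fun a b => decide (f b < f a)) x y = false := by
        intro y hy
        have := hg k (by simp) y hy
        simp [this, hfx]
      have hr : ∀ y ∈ K.flatMap g, (fun a b => decide (f b < f a)) x y = true := by
        intro y hy
        obtain ⟨k', hk', hyk'⟩ := List.mem_flatMap.mp hy
        have h1 := hg k' (by simp [hk']) y hyk'
        have := hKp k' hk'
        simp [h1, hfx]; omega
      rw [List.flatMap_cons, pv_insertBy_append _ _ _ _ hl, pv_insertBy_front _ _ _ hr]
      have h2 : (K.flatMap fun k' => g k' ++ if f x = k' then [x] else []) = K.flatMap g := by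
        apply List.flatMap_congr
        intro k' hk'
        simp [hnotK k' hk']
      rw [List.flatMap_cons, h2]
      simp [hfx]
    · have hxK : f x ∈ K := by
        rcases List.mem_cons.mp hx with h | h
        · exact absurd h hfx
        · exact h
      have hl : ∀ y ∈ g k, (fun a b => decide (f b < f a)) x y = false := by
        intro y hy
        have h1 := hg k (by simp) y hy
        have := hKp _ hxK
        simp [h1]; omega
      rw [List.flatMap_cons, pv_insertBy_append _ _ _ _ hl,
        ih hK.of_cons hxK (fun k' hk' => hg k' (by simp [hk']))]
      simp [List.flatMap_cons, hfx]

-- Python's stable reverse sort by an Int key IS the bucket concatenation, high key first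
theorem pv_sorted_rev_eq_flatMap {α : Type} (f : α → Int) (K : List Int) (xs : List α)
    (hK : K.Pairwise (· > ·)) (hxs : ∀ x ∈ xs, f x ∈ K) :
    PySem.List.sorted xs f true = K.flatMap (fun k => xs.filter (fun x => decide (f x = k))) := by
  rw [PySem.List.sorted_rev_eq_foldl_insertBy]
  induction xs using List.reverseRecOn with
  | nil => simp
  | append_singleton xs x ih =>
    rw [List.foldl_append, List.foldl_cons, List.foldl_nil,
      ih (fun y hy => hxs y (by simp [hy])),
      pv_insertBy_flatMap f x K _ hK (hxs x (by simp))
        (fun k hk y hy => by simpa using (List.mem_filter.mp hy).2)]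
    apply List.flatMap_congr
    intro k _
    by_cases h : f x = k <;> simp [List.filter_append, h]

-- the score of a paragraph, as A computes it
def pvScore (q : List String) (p : String) : Int :=
  q.foldl (fun acc w => if PySem.Str.isIn w (PySem.Str.lower p) then acc + 1 else acc) 0

theorem pvScore_eq_countP (q : List String) (p : String) :
    pvScore q p = (q.countP (fun w => PySem.Str.isIn w (PySem.Str.lower p)) : Int) := by
  simp [pvScore, PySem.List.foldl_if_add_one]

theorem pvScore_nonneg (q : List String) (p : String) : 0 ≤ pvScore q p := by
  rw [pvScore_eq_countP]; positivity

theorem pvScore_le (q : List String) (p : String) : pvScore q p ≤ q.length := by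
  rw [pvScore_eq_countP]
  exact_mod_cast List.countP_le_length

-- B's boolean sum is A's count
theorem pvSum_eq_score (q : List String) (p : String) :
    ((q.map (fun w => if PySem.Str.isIn w (PySem.Str.lower p) then (1 : Int) else 0)).sum)
      = pvScore q p := by
  rw [PySem.List.sum_map_ite_one_zero, pvScore_eq_countP]

-- B's fused strip/filter/score pass builds exactly A's scored list
theorem pv_scored_eq (q : List String) (chunks : List String) :
    chunks.foldl (fun acc chunk =>
        let p := PySem.Str.strip chunk
        if p == "" then acc
        else
          let pl := PySem.Str.lower p
          acc ++ [((q.map (fun w => if PySem.Str.isIn w pl then (1 : Int) else 0)).sum, p)]) []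
      = ((chunks.map PySem.Str.strip).filter (fun p => !(p == ""))).map (fun p => (pvScore q p, p)) := by
  have h : ∀ (acc : List (Int × String)), chunks.foldl (fun acc chunk =>
        let p := PySem.Str.strip chunk
        if p == "" then acc
        else
          let pl := PySem.Str.lower p
          acc ++ [((q.map (fun w => if PySem.Str.isIn w pl then (1 : Int) else 0)).sum, p)]) acc
      = chunks.foldl (fun acc chunk =>
          if !(PySem.Str.strip chunk == "") then acc ++ [(pvScore q (PySem.Str.strip chunk), PySem.Str.strip chunk)] else acc) acc := by
    intro acc
    apply PySem.List.foldl_congr_mem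
    intro a chunk _
    by_cases hc : (PySem.Str.strip chunk == "") = true <;>
      simp only [hc, Bool.not_true, Bool.not_false, if_true, if_false, Bool.false_eq_true,
        pvSum_eq_score]
  rw [h, PySem.List.foldl_append_if, List.nil_append, List.filter_map, List.map_map]
  rfl

-- B's two nested selection loops are the bucket concatenation over the countdown range
theorem pv_select_eq (scored : List (Int × String)) (ks : List Int) :
    ks.foldl (fun sel s => scored.foldl (fun sel x => if x.1 == s then sel ++ [x.2] else sel) sel) []
      = ks.flatMap (fun k => (scored.filter (fun x => decide (x.1 = k))).map (fun x => x.2)) := by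
  have h : (fun sel s => scored.foldl (fun sel x => if x.1 == s then sel ++ [x.2] else sel) sel)
      = fun (sel : List String) s => sel ++ (scored.filter (fun x => x.1 == s)).map (fun x => x.2) := by
    funext sel s
    exact PySem.List.foldl_append_if (fun x => x.1 == s) (fun x => x.2) scored sel
  rw [h, PySem.List.foldl_append_eq_flatMap, List.nil_append]
  apply List.flatMap_congr
  intro k _
  congr 1

-- main equality of the two selected lists (before slicing)
theorem pv_selected_eq (q paras : List String) :
    ((PySem.List.sorted (paras.map (fun p => (pvScore q p, p))) (fun x => x.1) true).filter
        (fun x => decide (0 < x.1))).map (fun x => x.2)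
      = (PySem.List.pyRange (q.length : Int) 0 (-1)).flatMap
          (fun k => ((paras.map (fun p => (pvScore q p, p))).filter (fun x => decide (x.1 = k))).map (fun x => x.2)) := by
  set n := q.length with hn
  set Kpos : List Int := (List.range n).map (fun k : Nat => ((n : Int) - (k : Int))) with hKpos
  set K0 : List Int := Kpos ++ [(0 : Int)] with hK0
  have hKposPW : Kpos.Pairwise (· > ·) := by
    rw [hKpos, List.pairwise_map]
    refine List.pairwise_lt_range.imp ?_
    intro a b hab
    simp only [gt_iff_lt]
    omega
  have hKposPos : ∀ k ∈ Kpos, (0 : Int) < k := by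
    intro k hk
    rw [hKpos] at hk
    obtain ⟨j, hj, rfl⟩ := List.mem_map.mp hk
    have := List.mem_range.mp hj
    omega
  have hK0PW : K0.Pairwise (· > ·) := by
    rw [hK0, List.pairwise_append]
    exact ⟨hKposPW, List.pairwise_singleton _ _, by
      intro a ha b hb
      simp at hb
      subst hb
      exact hKposPos a ha⟩
  have hmemKpos : ∀ s : Int, 1 ≤ s → s ≤ n → s ∈ Kpos := by
    intro s h1 h2
    rw [hKpos]
    exact List.mem_map.mpr ⟨((n : Int) - s).toNat, List.mem_range.mpr (by omega), by omega⟩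
  have hmem : ∀ x ∈ paras.map (fun p => (pvScore q p, p)), (fun x : Int × String => x.1) x ∈ K0 := by
    intro x hx
    obtain ⟨p, _, rfl⟩ := List.mem_map.mp hx
    show pvScore q p ∈ K0
    have h0 := pvScore_nonneg q p
    have h1 := pvScore_le q p
    rw [hK0, List.mem_append]
    by_cases hz : pvScore q p = 0
    · exact Or.inr (by simp [hz])
    · exact Or.inl (hmemKpos _ (by omega) (by omega))
  -- A's side: stable reverse sort = bucket concatenation over K0, then the filter drops bucket 0
  rw [pv_sorted_rev_eq_flatMap _ K0 _ hK0PW hmem]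
  have hfilter : (K0.flatMap (fun k => (paras.map (fun p => (pvScore q p, p))).filter
        (fun x => decide (x.1 = k)))).filter (fun x => decide (0 < x.1))
      = Kpos.flatMap (fun k => (paras.map (fun p => (pvScore q p, p))).filter
        (fun x => decide (x.1 = k))) := by
    rw [List.filter_flatMap, hK0, List.flatMap_append]
    have h2 : List.flatMap (fun k => ((paras.map (fun p => (pvScore q p, p))).filter
        (fun x => decide (x.1 = k))).filter (fun x => decide (0 < x.1))) [(0 : Int)] = [] := by
      simp only [List.flatMap_singleton]
      apply List.filter_eq_nil_iff.mpr
      intro x hx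
      have hx2 := (List.mem_filter.mp hx).2
      simp at hx2 ⊢
      omega
    rw [h2, List.append_nil]
    apply List.flatMap_congr
    intro k hk
    apply List.filter_eq_self.mpr
    intro x hx
    have hxk := (List.mem_filter.mp hx).2
    have := hKposPos k hk
    simp at hxk ⊢
    omega
  rw [hfilter, List.map_flatMap]
  -- B's side: pyRange n 0 (-1) is exactly Kpos
  have htn : (((n : Int) - 0)).toNat = n := by omega
  rw [PySem.List.pyRange_neg_one, htn, ← hKpos]

-- ===== VERDICT (by name: the statement is the Claim_ definition above) =====
theorem simple_local_retriever_spec : Claim_equal_simple_local_retriever := by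
  intro query kb_text top_n _
  unfold Spec_simple_local_retriever simple_local_retriever simple_local_retriever_alt
  simp only []
  rw [pv_q_filter_id, pv_scored_eq, pv_select_eq]
  have h := pv_selected_eq
      (PySem.Str.split₀ (PySem.Str.lower query))
      ((((PySem.Str.split? kb_text "\n\n").getD []).map PySem.Str.strip).filter (fun p => !(p == "")))
  simp only [pvScore] at h
  rw [h]
  simp only [pvScore]
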